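-- pv_equiv track=rewrite | github.com/stathiskal11/driver-sensor-recognition | scripts/build_paper_window_index.py | build_next_positive_index
-- ===== SOURCE A (Python) =====
-- def event_matches(key_event: str, label_mode: str) -> bool:
--     if label_mode in {"final_keydown", "future_keydown"}:
--         return key_event == "main_keydown"
--     if label_mode in {"final_non_o", "future_non_o"}:
--         return key_event != "O"
--     raise ValueError(f"Unsupported label mode: {label_mode}")
--
-- def build_next_positive_index(rows: list[dict[str, str]], label_mode: str) -> list[int | None]:
--     next_positive: list[int | None] = [None] * len(rows)
--     next_seen: int | None = None
--     for idx in range(len(rows) - 1, -1, -1):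
--         if event_matches(rows[idx].get("KeyEvent", "O"), label_mode):
--             next_seen = idx
--         next_positive[idx] = next_seen
--     return next_positive
-- ===== SOURCE B (Python) =====
-- def event_matches(key_event: str, label_mode: str) -> bool:
--     if label_mode in {"final_keydown", "future_keydown"}:
--         return key_event == "main_keydown"
--     if label_mode in {"final_non_o", "future_non_o"}:
--         return key_event != "O"
--     raise ValueError(f"Unsupported label mode: {label_mode}")
--
-- def build_next_positive_index(rows: list[dict[str, str]], label_mode: str) -> list[int | None]:
--     # Forward one-pass: keep the indices still waiting for their next positive;
--     # when a positive row is found, flush them all to it.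
--     result: list[int | None] = [None] * len(rows)
--     pending: list[int] = []
--     for i, row in enumerate(rows):
--         pending.append(i)
--         if event_matches(row.get("KeyEvent", "O"), label_mode):
--             for j in pending:
--                 result[j] = i
--             pending = []
--     return result
-- ===== Notes on version B (the rewrite author's own statement) =====
-- stated objective: alternative
-- what changed: A sweeps backwards over the rows carrying one running 'next seen' scalar; B makes a single forward pass keeping a pending list of indices that have not yet seen a positive and flushes them all to each positive index as it is found.
import Mathlib
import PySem

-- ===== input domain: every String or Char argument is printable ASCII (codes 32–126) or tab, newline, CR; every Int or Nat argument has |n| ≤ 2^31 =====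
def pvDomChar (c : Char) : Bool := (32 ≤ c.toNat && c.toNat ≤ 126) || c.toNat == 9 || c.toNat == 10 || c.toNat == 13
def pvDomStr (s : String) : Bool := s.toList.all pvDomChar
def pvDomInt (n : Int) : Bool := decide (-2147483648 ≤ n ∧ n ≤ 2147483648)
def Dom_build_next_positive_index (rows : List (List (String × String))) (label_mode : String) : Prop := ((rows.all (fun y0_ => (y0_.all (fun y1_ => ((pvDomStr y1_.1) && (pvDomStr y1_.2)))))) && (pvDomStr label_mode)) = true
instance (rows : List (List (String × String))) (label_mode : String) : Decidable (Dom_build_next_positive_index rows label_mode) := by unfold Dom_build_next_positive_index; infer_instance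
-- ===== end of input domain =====

-- B replaces A's backward sweep with a forward pass over a pending-index list; same cost, proved equal on Pre_ (valid label modes, where A does not raise).

-- shared helper (both Source A and Source B define the identical event_matches);
-- on an unsupported label_mode Python raises ValueError — those inputs are outside Pre_ — so the final branch's value is never relied upon.
def event_matches (key_event : String) (label_mode : String) : Bool :=
  if label_mode == "final_keydown" || label_mode == "future_keydown" then key_event == "main_keydown"
  else if label_mode == "final_non_o" || label_mode == "future_non_o" then key_event != "O"
  else false

-- ===== PORT A =====
def build_next_positive_index (rows : List (List (String × String))) (label_mode : String) : List (Option Int) :=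
  let n : Int := (rows.length : Int)
  let st := (PySem.List.pyRange (n - 1) (-1) (-1)).foldl
    (fun (st : List (Option Int) × Option Int) idx =>
      let row := PySem.List.pyGetD rows idx []
      let next_seen := if event_matches ((PySem.Dict.mk row).getD "KeyEvent" "O") label_mode then some idx else st.2
      (PySem.List.pySetD st.1 idx next_seen, next_seen))
    (List.replicate rows.length none, none)
  st.1

-- ===== PORT B =====
def build_next_positive_index_alt (rows : List (List (String × String))) (label_mode : String) : List (Option Int) :=
  let st := (PySem.List.enumerate rows 0).foldl
    (fun (st : List (Option Int) × List Int) p =>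
      let pending := st.2 ++ [p.1]
      if event_matches ((PySem.Dict.mk p.2).getD "KeyEvent" "O") label_mode then
        (pending.foldl (fun r j => PySem.List.pySetD r j (some p.1)) st.1, [])
      else (st.1, pending))
    (List.replicate rows.length none, [])
  st.1

-- ===== PRECONDITION & SPEC =====
-- Pre_ excludes exactly the inputs where Python A raises ValueError: an unsupported
-- label_mode together with at least one row (with no rows, event_matches is never called).
def Pre_build_next_positive_index (rows : List (List (String × String))) (label_mode : String) : Prop :=
  rows = [] ∨ label_mode = "final_keydown" ∨ label_mode = "future_keydown" ∨ label_mode = "final_non_o" ∨ label_mode = "future_non_o"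
instance (rows : List (List (String × String))) (label_mode : String) : Decidable (Pre_build_next_positive_index rows label_mode) := by unfold Pre_build_next_positive_index; infer_instance

def pvWitness_build_next_positive_index : (List (List (String × String))) × String :=
  ([[("KeyEvent", "main_keydown")], []], "final_keydown")

def Spec_build_next_positive_index (rows : List (List (String × String))) (label_mode : String) (out : List (Option Int)) : Prop := out = build_next_positive_index_alt rows label_mode
instance (rows : List (List (String × String))) (label_mode : String) (out : List (Option Int)) : Decidable (Spec_build_next_positive_index rows label_mode out) := by unfold Spec_build_next_positive_index; infer_instance

-- ===== CLAIM (what is proved, stated in full; the proofs are below) =====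
def Claim_equal_build_next_positive_index : Prop := ∀ (rows : List (List (String × String))) (label_mode : String), Dom_build_next_positive_index rows label_mode → Pre_build_next_positive_index rows label_mode → Spec_build_next_positive_index rows label_mode (build_next_positive_index rows label_mode)

-- ===== LEMMAS AND PROOFS =====

-- first index ≥ k (as an Int) whose flag is true, over the flag list starting at position k
def firstT : List Bool → Int → Option Int
  | [], _ => none
  | b :: bs, k => if b then some k else firstT bs (k + 1)

-- the common specification: position j holds the first positive index ≥ j
def specList (flags : List Bool) : List (Option Int) :=
  (List.range flags.length).map (fun j => firstT (flags.drop j) (j : Int))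

def flagsOf (rows : List (List (String × String))) (label_mode : String) : List Bool :=
  rows.map (fun row => event_matches ((PySem.Dict.mk row).getD "KeyEvent" "O") label_mode)

theorem firstT_append (l : List Bool) (b : Bool) (k : Int) :
    firstT (l ++ [b]) k =
      (firstT l k).orElse (fun _ => if b then some (k + l.length) else none) := by
  induction l generalizing k with
  | nil => cases b <;> simp [firstT]
  | cons x xs ih =>
    by_cases hx : x = true
    · simp [firstT, hx]
    · simp only [Bool.not_eq_true] at hx
      simp [firstT, hx, ih (k + 1)]
      ring_nf


-- F flags m j: the first positive index in [j, m) (as an Int), none if there is none yet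
def F (flags : List Bool) (m j : Nat) : Option Int := firstT ((flags.take m).drop j) (j : Int)

theorem F_ge (flags : List Bool) (m j : Nat) (hj : m ≤ j) : F flags m j = none := by
  unfold F
  rw [List.drop_eq_nil_of_le (by simp; omega)]
  rfl

theorem F_full (flags : List Bool) (m j : Nat) (h : flags.length ≤ m) :
    F flags m j = firstT (flags.drop j) (j : Int) := by
  unfold F
  rw [List.take_of_length_le h]

theorem F_succ (flags : List Bool) (m j : Nat) (hm : m < flags.length) (hj : j ≤ m) :
    F flags (m + 1) j = (F flags m j).orElse (fun _ => if flags[m] then some (m : Int) else none) := by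
  unfold F
  rw [List.take_succ, List.getElem?_eq_getElem hm]
  simp only [Option.toList_some]
  rw [List.drop_append_of_le_length (by simp; omega), firstT_append]
  congr 1
  funext u
  congr 2
  have : ((flags.take m).drop j).length = m - j := by simp; omega
  rw [this]
  omega

theorem foldl_set_getElem? {α : Type} (ps : List Nat) (r : List α) (v : α) (i : Nat) :
    (ps.foldl (fun r j => r.set j v) r)[i]? =
      if i ∈ ps ∧ i < r.length then some v else r[i]? := by
  induction ps generalizing r with
  | nil => simp
  | cons p ps ih =>
    rw [List.foldl_cons, ih]
    simp only [List.length_set, List.getElem?_set, List.mem_cons]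
    by_cases hip : i = p
    · subst hip
      by_cases hlen : i < r.length
      · by_cases hmem : i ∈ ps <;> simp [hmem, hlen]
      · have hnone : r[i]? = none := List.getElem?_eq_none (by omega)
        by_cases hmem : i ∈ ps <;> simp [hmem, hlen]
    · have hpi : ¬ p = i := Ne.symm hip
      by_cases hmem : i ∈ ps <;> simp [hmem, hip, hpi]

theorem foldl_pySetD_cast (ps : List Nat) (r : List (Option Int)) (v : Option Int) :
    (ps.map (Nat.cast : Nat → Int)).foldl (fun r j => PySem.List.pySetD r j v) r =
      ps.foldl (fun r j => r.set j v) r := by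
  induction ps generalizing r with
  | nil => rfl
  | cons p ps ih =>
    rw [List.map_cons, List.foldl_cons, List.foldl_cons, PySem.List.pySetD_natCast]
    exact ih (r.set p v)

theorem length_flagsOf (rows : List (List (String × String))) (lm : String) :
    (flagsOf rows lm).length = rows.length := by simp [flagsOf]

theorem length_specList (flags : List Bool) : (specList flags).length = flags.length := by
  simp [specList]

theorem getElem_specList (flags : List Bool) (j : Nat) (hj : j < flags.length) :
    (specList flags)[j]'(by rw [length_specList]; exact hj) = firstT (flags.drop j) (j : Int) := by
  simp [specList]

-- ===== A-side fold characterisation =====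
theorem foldA (rows : List (List (String × String))) (lm : String)
    (step : List (Option Int) × Option Int → Int → List (Option Int) × Option Int)
    (hstep : ∀ st idx, step st idx =
      (PySem.List.pySetD st.1 idx (if event_matches ((PySem.Dict.mk (PySem.List.pyGetD rows idx [])).getD "KeyEvent" "O") lm then some idx else st.2),
       if event_matches ((PySem.Dict.mk (PySem.List.pyGetD rows idx [])).getD "KeyEvent" "O") lm then some idx else st.2)) :
    ∀ (m : Nat), m ≤ rows.length → ∀ res : List (Option Int), res.length = rows.length →
    (PySem.List.pyRange 0 (m : Int) 1).foldr (fun idx st => step st idx)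
        (res, firstT ((flagsOf rows lm).drop m) (m : Int))
    = ((specList (flagsOf rows lm)).take m ++ res.drop m, firstT (flagsOf rows lm) 0) := by
  intro m
  induction m with
  | zero =>
    intro _ res hres
    simp
  | succ m ih =>
    intro hm res hres
    have hmlt : m < rows.length := by omega
    have hflen : (flagsOf rows lm).length = rows.length := length_flagsOf rows lm
    have hcast : ((m + 1 : Nat) : Int) = (m : Int) + 1 := by push_cast; ring
    rw [hcast, PySem.List.pyRange_one_succ_right (by positivity), List.foldr_append]
    simp only [List.foldr_cons, List.foldr_nil]
    rw [hstep]
    have hrow : PySem.List.pyGetD rows ((m : Nat) : Int) [] = rows[m] := by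
      rw [PySem.List.pyGetD_natCast, List.getD_eq_getElem rows [] hmlt]
    have hflag : event_matches ((PySem.Dict.mk rows[m]).getD "KeyEvent" "O") lm
        = (flagsOf rows lm)[m]'(by omega) := by
      simp [flagsOf]
    have hdrop : (flagsOf rows lm).drop m
        = (flagsOf rows lm)[m]'(by omega) :: (flagsOf rows lm).drop (m + 1) := by
      exact List.drop_eq_getElem_cons (by omega)
    have hns : (if event_matches ((PySem.Dict.mk (PySem.List.pyGetD rows ((m : Nat) : Int) [])).getD "KeyEvent" "O") lm
          then some ((m : Nat) : Int) else firstT ((flagsOf rows lm).drop (m + 1)) (((m + 1 : Nat)) : Int))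
        = firstT ((flagsOf rows lm).drop m) (m : Int) := by
      rw [hrow, hflag, hdrop]
      simp only [firstT]
      push_cast
      rfl
    rw [← hcast, hns]
    set ns := firstT ((flagsOf rows lm).drop m) (m : Int) with hnsdef
    rw [PySem.List.pySetD_natCast]
    rw [ih (by omega) (res.set m ns) (by simp [hres])]
    congr 1
    have hresm : m < res.length := by omega
    have hspec : m < (specList (flagsOf rows lm)).length := by
      rw [length_specList]; omega
    rw [List.drop_set, if_neg (lt_irrefl m)]
    simp only [Nat.sub_self]
    rw [List.drop_eq_getElem_cons hresm, List.set_cons_zero]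
    rw [List.take_succ, List.getElem?_eq_getElem hspec]
    simp only [Option.toList_some, List.append_assoc, List.singleton_append]
    congr 2
    rw [getElem_specList _ _ (by omega)]

theorem lemA (rows : List (List (String × String))) (label_mode : String) :
    build_next_positive_index rows label_mode = specList (flagsOf rows label_mode) := by
  have hdef : build_next_positive_index rows label_mode =
    ((PySem.List.pyRange ((rows.length : Int) - 1) (-1) (-1)).foldl
      (fun (st : List (Option Int) × Option Int) idx =>
        (PySem.List.pySetD st.1 idx (if event_matches ((PySem.Dict.mk (PySem.List.pyGetD rows idx [])).getD "KeyEvent" "O") label_mode then some idx else st.2),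
         if event_matches ((PySem.Dict.mk (PySem.List.pyGetD rows idx [])).getD "KeyEvent" "O") label_mode then some idx else st.2))
      (List.replicate rows.length none, none)).1 := rfl
  rw [hdef, PySem.List.pyRange_neg_one_eq_reverse]
  have h0 : (-1 : Int) + 1 = 0 := by norm_num
  have h1 : ((rows.length : Int) - 1) + 1 = (rows.length : Int) := by ring
  rw [h0, h1, List.foldl_reverse]
  have hfin : firstT ((flagsOf rows label_mode).drop rows.length) (rows.length : Int) = none := by
    rw [List.drop_eq_nil_of_le (by rw [length_flagsOf])]
    rfl
  have hA := foldA rows label_mode _ (fun st idx => rfl) rows.length (le_refl _)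
      (List.replicate rows.length none) (by simp)
  rw [hfin] at hA
  refine Eq.trans (congrArg Prod.fst hA) ?_
  simp only [List.drop_replicate, Nat.sub_self, List.replicate_zero, List.append_nil]
  rw [List.take_of_length_le (by rw [length_specList, length_flagsOf])]

-- ===== B-side fold characterisation =====
theorem F_zero (flags : List Bool) (j : Nat) : F flags 0 j = none := F_ge flags 0 j (Nat.zero_le j)

theorem foldB (rows : List (List (String × String))) (lm : String)
    (step : List (Option Int) × List Int → Int × List (String × String) → List (Option Int) × List Int)
    (hstep : ∀ st p, step st p =
      (if event_matches ((PySem.Dict.mk p.2).getD "KeyEvent" "O") lm then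
        ((st.2 ++ [p.1]).foldl (fun r j => PySem.List.pySetD r j (some p.1)) st.1, ([] : List Int))
      else (st.1, st.2 ++ [p.1]))) :
    ∀ (suffix : List (List (String × String))) (m : Nat), rows.drop m = suffix →
    ((PySem.List.enumerate suffix (m : Int)).foldl step
      ((List.range rows.length).map (fun j => F (flagsOf rows lm) m j),
       ((List.range m).filter (fun j => decide (F (flagsOf rows lm) m j = none))).map (Nat.cast : Nat → Int))).1
    = (List.range rows.length).map (fun j => firstT ((flagsOf rows lm).drop j) (j : Int)) := by
  intro suffix
  induction suffix with
  | nil =>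
    intro m hm
    have hn : rows.length ≤ m := List.drop_eq_nil_iff.mp hm
    simp only [PySem.List.enumerate_nil, List.foldl_nil]
    apply List.map_congr_left
    intro j _
    exact F_full _ _ _ (by rw [length_flagsOf]; exact hn)
  | cons x xs ih =>
    intro m hm
    have hflen : (flagsOf rows lm).length = rows.length := length_flagsOf rows lm
    have hmlt : m < rows.length := by
      by_contra hc
      rw [List.drop_eq_nil_of_le (by omega)] at hm
      simp at hm
    have hdropr : rows.drop m = rows[m] :: rows.drop (m + 1) := List.drop_eq_getElem_cons hmlt
    rw [hdropr] at hm
    have hx : x = rows[m] := ((List.cons.injEq _ _ _ _ ▸ hm).1).symm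
    have hxs : rows.drop (m + 1) = xs := (List.cons.injEq _ _ _ _ ▸ hm).2
    have hflag : event_matches ((PySem.Dict.mk x).getD "KeyEvent" "O") lm
        = (flagsOf rows lm)[m]'(by omega) := by
      rw [hx]; simp [flagsOf]
    rw [PySem.List.enumerate_cons, List.foldl_cons, hstep]
    have hcast : ((m : Int) + 1) = ((m + 1 : Nat) : Int) := by push_cast; ring
    rw [hcast]
    have hFmm : F (flagsOf rows lm) m m = none := F_ge _ _ _ (le_refl m)
    simp only [hflag]
    by_cases hb : (flagsOf rows lm)[m]'(by omega) = true
    · rw [if_pos hb]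
      -- flush: the array becomes the (m+1)-stage array, the pending list empties
      have hres : (((List.range m).filter (fun j => decide (F (flagsOf rows lm) m j = none))).map (Nat.cast : Nat → Int) ++ [(m : Int)]).foldl
            (fun r j => PySem.List.pySetD r j (some (m : Int)))
            ((List.range rows.length).map (fun j => F (flagsOf rows lm) m j))
          = (List.range rows.length).map (fun j => F (flagsOf rows lm) (m + 1) j) := by
        have hps : (((List.range m).filter (fun j => decide (F (flagsOf rows lm) m j = none))).map (Nat.cast : Nat → Int) ++ [(m : Int)])
            = (((List.range m).filter (fun j => decide (F (flagsOf rows lm) m j = none))) ++ [m]).map (Nat.cast : Nat → Int) := by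
          rw [List.map_append]; rfl
        rw [hps, foldl_pySetD_cast]
        set ps := ((List.range m).filter (fun j => decide (F (flagsOf rows lm) m j = none))) ++ [m] with hpsdef
        have hmem : ∀ i : Nat, i ∈ ps ↔ ((i < m ∧ F (flagsOf rows lm) m i = none) ∨ i = m) := by
          intro i
          rw [hpsdef]
          simp [List.mem_filter, List.mem_range]
        apply List.ext_getElem?
        intro i
        rw [foldl_set_getElem?]
        simp only [List.length_map, List.length_range]
        by_cases hin : i < rows.length
        · have h1 : ((List.range rows.length).map (fun j => F (flagsOf rows lm) m j))[i]?
              = some (F (flagsOf rows lm) m i) := by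
            rw [List.getElem?_map, List.getElem?_range hin]; rfl
          have h2 : ((List.range rows.length).map (fun j => F (flagsOf rows lm) (m + 1) j))[i]?
              = some (F (flagsOf rows lm) (m + 1) i) := by
            rw [List.getElem?_map, List.getElem?_range hin]; rfl
          rw [h1, h2]
          by_cases him : i ≤ m
          · rw [F_succ _ _ _ (by omega) him]
            cases hFi : F (flagsOf rows lm) m i with
            | none =>
              have hmem' : i ∈ ps := by
                rcases Nat.lt_or_ge i m with hilt | hge
                · exact (hmem i).mpr (Or.inl ⟨hilt, hFi⟩)
                · exact (hmem i).mpr (Or.inr (by omega))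
              rw [if_pos ⟨hmem', hin⟩]
              simp [Option.orElse, hb]
            | some v =>
              rw [if_neg]
              · simp [Option.orElse]
              · intro ⟨hmemi, _⟩
                rcases (hmem i).mp hmemi with ⟨_, hnone⟩ | hieq
                · rw [hFi] at hnone; simp at hnone
                · rw [hieq, hFmm] at hFi; simp at hFi
          · rw [if_neg, F_ge _ _ _ (by omega), F_ge _ _ _ (by omega)]
            intro ⟨hmemi, _⟩
            rcases (hmem i).mp hmemi with ⟨hlt, _⟩ | hieq <;> omega
        · rw [if_neg (by intro ⟨_, h⟩; exact hin h)]
          rw [List.getElem?_eq_none (by simpa using (by omega : rows.length ≤ i)),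
              List.getElem?_eq_none (by simpa using (by omega : rows.length ≤ i))]
      have hpend : ([] : List Int)
          = ((List.range (m + 1)).filter (fun j => decide (F (flagsOf rows lm) (m + 1) j = none))).map (Nat.cast : Nat → Int) := by
        have : (List.range (m + 1)).filter (fun j => decide (F (flagsOf rows lm) (m + 1) j = none)) = [] := by
          rw [List.filter_eq_nil_iff]
          intro j hj
          rw [List.mem_range] at hj
          rw [F_succ _ _ _ (by omega) (by omega)]
          cases hF : F (flagsOf rows lm) m j <;> simp [Option.orElse, hb]
        rw [this]; rfl
      rw [hres]
      conv_lhs => rw [hpend]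
      exact ih (m + 1) hxs
    · rw [if_neg hb]
      have hb' : (flagsOf rows lm)[m]'(by omega) = false := by
        cases h : (flagsOf rows lm)[m]'(by omega)
        · rfl
        · exact absurd h hb
      have hFeq : ∀ j : Nat, j ≤ m → F (flagsOf rows lm) (m + 1) j = F (flagsOf rows lm) m j := by
        intro j hj
        rw [F_succ _ _ _ (by omega) hj, hb']
        cases hF : F (flagsOf rows lm) m j <;> simp [Option.orElse]
      have hres : ((List.range rows.length).map (fun j => F (flagsOf rows lm) m j))
          = (List.range rows.length).map (fun j => F (flagsOf rows lm) (m + 1) j) := by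
        apply List.map_congr_left
        intro j hj
        by_cases hjm : j ≤ m
        · rw [hFeq j hjm]
        · rw [F_ge _ _ _ (by omega), F_ge _ _ _ (by omega)]
      have hpend : ((List.range m).filter (fun j => decide (F (flagsOf rows lm) m j = none))).map (Nat.cast : Nat → Int) ++ [(m : Int)]
          = ((List.range (m + 1)).filter (fun j => decide (F (flagsOf rows lm) (m + 1) j = none))).map (Nat.cast : Nat → Int) := by
        rw [List.range_succ, List.filter_append, List.map_append]
        congr 1
        · congr 1
          apply List.filter_congr
          intro j hj
          rw [List.mem_range] at hj
          rw [hFeq j (by omega)]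
        · have : F (flagsOf rows lm) (m + 1) m = none := by
            rw [F_succ _ _ _ (by omega) (le_refl m), hFmm, hb']
            simp [Option.orElse]
          simp [this]
      rw [hres]
      conv_lhs => rw [hpend]
      exact ih (m + 1) hxs

theorem lemB (rows : List (List (String × String))) (label_mode : String) :
    build_next_positive_index_alt rows label_mode = specList (flagsOf rows label_mode) := by
  have hdef : build_next_positive_index_alt rows label_mode =
    ((PySem.List.enumerate rows (0 : Int)).foldl
      (fun (st : List (Option Int) × List Int) p =>
        if event_matches ((PySem.Dict.mk p.2).getD "KeyEvent" "O") label_mode then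
          ((st.2 ++ [p.1]).foldl (fun r j => PySem.List.pySetD r j (some p.1)) st.1, ([] : List Int))
        else (st.1, st.2 ++ [p.1]))
      (List.replicate rows.length none, ([] : List Int))).1 := rfl
  have hinit : (List.replicate rows.length (none : Option Int))
      = (List.range rows.length).map (fun j => F (flagsOf rows label_mode) 0 j) := by
    apply List.ext_getElem?
    intro i
    rw [List.getElem?_replicate, List.getElem?_map]
    by_cases hin : i < rows.length
    · rw [if_pos hin, List.getElem?_range hin]
      simp [F_zero]
    · rw [if_neg hin, List.getElem?_eq_none (by simp only [List.length_range]; omega)]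
      rfl
  have h0 : ((0 : Nat) : Int) = (0 : Int) := by norm_num
  have hB := foldB rows label_mode _ (fun st p => rfl) rows 0 (by rfl)
  rw [h0] at hB
  simp only [List.range_zero, List.filter_nil, List.map_nil] at hB
  rw [hdef, hinit]
  rw [hB]
  unfold specList
  rw [length_flagsOf]

-- ===== VERDICT (by name: the statement is the Claim_ definition above) =====
theorem build_next_positive_index_spec : Claim_equal_build_next_positive_index := by
  intro rows label_mode _ _
  unfold Spec_build_next_positive_index
  rw [lemA, lemB]
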